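-- pv_equiv track=rewrite | github.com/Fungucide/Genshin-Discord-Bot | util.py | calculate_required_materials
-- ===== SOURCE A (Python) =====
-- from typing import List, Tuple
--
-- def calculate_required_materials(current_level: int, desired_level: int,
--     amts_per_level: List[Tuple[int, int]]) -> List[Tuple[int, int]]:
--
--     ret = []
--
--     for i in range(current_level + 1, desired_level + 1):
--         level_rarity = amts_per_level[i][0]
--         level_amt = amts_per_level[i][1]
--
--         if len(ret) == 0 or level_rarity != ret[-1][0]:
--             ret.append((level_rarity, 0))
--
--         ret[-1] = (ret[-1][0], ret[-1][1] + level_amt)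
--
--     return ret
-- ===== SOURCE B (Python) =====
-- def calculate_required_materials(current_level, desired_level, amts_per_level):
--     levels = [amts_per_level[i] for i in range(current_level + 1, desired_level + 1)]
--
--     def runs(xs):
--         # recursion on maximal runs: peel the leading run of equal rarity,
--         # sum it, and recurse on the remainder
--         if not xs:
--             return []
--         r, a = xs[0]
--         i = 1
--         while i < len(xs) and xs[i][0] == r:
--             i += 1
--         total = a + sum(amt for _, amt in xs[1:i])
--         return [(r, total)] + runs(xs[i:])
--
--     return runs(levels)
-- ===== Notes on version B (the rewrite author's own statement) =====
-- stated objective: alternative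
-- what changed: B replaces A's single pass that appends a zero entry and mutates ret[-1] with a recursive runs decomposition: it peels the maximal leading run of equal rarity, sums that run's amounts as a block, and recurses on the remainder, building the output front-to-back one run per call.
import Mathlib
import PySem

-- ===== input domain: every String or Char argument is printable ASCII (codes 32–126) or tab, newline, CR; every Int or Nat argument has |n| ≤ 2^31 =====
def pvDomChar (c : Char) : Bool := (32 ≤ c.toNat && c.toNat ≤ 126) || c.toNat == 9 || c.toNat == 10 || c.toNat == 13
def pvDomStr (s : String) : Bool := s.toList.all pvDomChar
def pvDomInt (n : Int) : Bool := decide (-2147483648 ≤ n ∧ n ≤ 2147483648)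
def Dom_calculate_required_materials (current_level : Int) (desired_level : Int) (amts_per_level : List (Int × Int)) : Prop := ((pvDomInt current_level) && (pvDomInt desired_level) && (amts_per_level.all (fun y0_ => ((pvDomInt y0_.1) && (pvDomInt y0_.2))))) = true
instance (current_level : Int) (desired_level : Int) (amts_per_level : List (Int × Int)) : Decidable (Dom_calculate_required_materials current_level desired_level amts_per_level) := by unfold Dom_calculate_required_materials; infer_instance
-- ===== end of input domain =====

-- B gathers the selected (rarity, amount) pairs and then decomposes them recursively into
-- maximal runs of equal rarity, summing each run as a block, instead of A's single
-- append-then-mutate-last loop; same cost.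

-- ===== PORT A =====
-- one iteration of A's loop body on the pair amts_per_level[i] = (level_rarity, level_amt)
def pvStepA (ret : List (Int × Int)) (p : Int × Int) : List (Int × Int) :=
  let ret1 := if ret.length = 0 ∨ p.1 ≠ (ret.getLastD (0, 0)).1 then ret ++ [(p.1, 0)] else ret
  ret1.dropLast ++ [((ret1.getLastD (0, 0)).1, (ret1.getLastD (0, 0)).2 + p.2)]

-- the loop body: look up amts_per_level[i] (none = IndexError, excluded by Pre_) and apply the step
def pvBodyA (amts_per_level : List (Int × Int)) (ret : List (Int × Int)) (i : Int) : List (Int × Int) :=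
  match PySem.List.pyGet? amts_per_level i with
  | none => ret
  | some p => pvStepA ret p

def calculate_required_materials (current_level : Int) (desired_level : Int) (amts_per_level : List (Int × Int)) : List (Int × Int) :=
  (PySem.List.pyRange (current_level + 1) (desired_level + 1) 1).foldl (pvBodyA amts_per_level) []

-- ===== PORT B =====
-- Source B's 'runs': the while loop counts the maximal prefix of the tail with the same rarity
-- (= takeWhile); the run is summed as a block and the recursion continues on the remainder
def pvRuns : List (Int × Int) → List (Int × Int)
  | [] => []
  | (r, a) :: t =>
    let run := t.takeWhile (fun p => p.1 == r)
    (r, a + (run.map Prod.snd).sum) :: pvRuns (t.drop run.length)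
termination_by xs => xs.length
decreasing_by simp only [List.length_drop, List.length_cons]; omega

def calculate_required_materials_alt (current_level : Int) (desired_level : Int) (amts_per_level : List (Int × Int)) : List (Int × Int) :=
  pvRuns
    ((PySem.List.pyRange (current_level + 1) (desired_level + 1) 1).filterMap
      (PySem.List.pyGet? amts_per_level))   -- IndexError (excluded by Pre_) modelled as skip

-- ===== PRECONDITION & SPEC =====
-- exactly the inputs where A's indexing never raises: empty range, or all indices
-- current_level+1 .. desired_level within Python's (wraparound-allowing) bounds
def Pre_calculate_required_materials (current_level : Int) (desired_level : Int) (amts_per_level : List (Int × Int)) : Prop :=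
  desired_level ≤ current_level ∨
    (-(amts_per_level.length : Int) ≤ current_level + 1 ∧ desired_level < amts_per_level.length)
instance (current_level : Int) (desired_level : Int) (amts_per_level : List (Int × Int)) : Decidable (Pre_calculate_required_materials current_level desired_level amts_per_level) := by unfold Pre_calculate_required_materials; infer_instance

def pvWitness_calculate_required_materials : Int × Int × (List (Int × Int)) := (0, 2, [(1, 5), (1, 3), (2, 4)])

def Spec_calculate_required_materials (current_level : Int) (desired_level : Int) (amts_per_level : List (Int × Int)) (out : List (Int × Int)) : Prop := out = calculate_required_materials_alt current_level desired_level amts_per_level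
instance (current_level : Int) (desired_level : Int) (amts_per_level : List (Int × Int)) (out : List (Int × Int)) : Decidable (Spec_calculate_required_materials current_level desired_level amts_per_level out) := by unfold Spec_calculate_required_materials; infer_instance

-- ===== CLAIM (what is proved, stated in full; the proofs are below) =====
def Claim_equal_calculate_required_materials : Prop := ∀ (current_level : Int) (desired_level : Int) (amts_per_level : List (Int × Int)), Dom_calculate_required_materials current_level desired_level amts_per_level → Pre_calculate_required_materials current_level desired_level amts_per_level → Spec_calculate_required_materials current_level desired_level amts_per_level (calculate_required_materials current_level desired_level amts_per_level)

-- ===== LEMMAS AND PROOFS =====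

-- the fold that skips 'none' lookups equals the fold over the filtered list
theorem pv_foldl_skip_none (amts : List (Int × Int)) (init : List (Int × Int)) (is : List Int) :
    is.foldl (pvBodyA amts) init
      = (is.filterMap (PySem.List.pyGet? amts)).foldl pvStepA init := by
  induction is generalizing init with
  | nil => rfl
  | cons x t ih =>
    simp only [List.foldl_cons, List.filterMap_cons, pvBodyA]
    cases PySem.List.pyGet? amts x <;> simp [ih]

-- merging a new amount into a pending run of the same rarity
theorem pvRuns_merge (r acc pa : Int) (t : List (Int × Int)) :
    pvRuns ((r, acc) :: (r, pa) :: t) = pvRuns ((r, acc + pa) :: t) := by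
  simp [pvRuns]
  ring

-- starting a new run when the rarity changes
theorem pvRuns_break (r acc pr pa : Int) (t : List (Int × Int)) (h : pr ≠ r) :
    pvRuns ((r, acc) :: (pr, pa) :: t) = (r, acc) :: pvRuns ((pr, pa) :: t) := by
  simp [pvRuns, h]

-- run-invariant: A's state out ++ [(r,acc)] corresponds to a pending run (r,acc) before ps
theorem pv_run_inv (ps : List (Int × Int)) :
    ∀ (out : List (Int × Int)) (r acc : Int),
      ps.foldl pvStepA (out ++ [(r, acc)]) = out ++ pvRuns ((r, acc) :: ps) := by
  induction ps with
  | nil => intro out r acc; simp [pvRuns]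
  | cons p t ih =>
    intro out r acc
    obtain ⟨pr, pa⟩ := p
    by_cases h : r = pr
    · subst h
      have hA : pvStepA (out ++ [(r, acc)]) (r, pa) = out ++ [(r, acc + pa)] := by
        simp [pvStepA]
      simp only [List.foldl_cons, hA, pvRuns_merge]
      exact ih out r (acc + pa)
    · have hA : pvStepA (out ++ [(r, acc)]) (pr, pa)
          = (out ++ [(r, acc)]) ++ [(pr, pa)] := by
        simp [pvStepA, Ne.symm h]
      simp only [List.foldl_cons, hA, pvRuns_break r acc pr pa t (Ne.symm h)]
      simpa using ih (out ++ [(r, acc)]) pr pa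

theorem pv_runs_eq (ps : List (Int × Int)) :
    ps.foldl pvStepA [] = pvRuns ps := by
  cases ps with
  | nil => simp [pvRuns]
  | cons p t =>
    obtain ⟨pr, pa⟩ := p
    have hA : pvStepA [] (pr, pa) = [] ++ [(pr, pa)] := by simp [pvStepA]
    simp only [List.foldl_cons, hA]
    simpa using pv_run_inv t [] pr pa

-- ===== VERDICT (by name: the statement is the Claim_ definition above) =====
theorem calculate_required_materials_spec : Claim_equal_calculate_required_materials := by
  intro cl dl amts _ _
  unfold Spec_calculate_required_materials calculate_required_materials calculate_required_materials_alt
  rw [pv_foldl_skip_none]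
  exact pv_runs_eq _
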